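-- pv_equiv track=rewrite | github.com/mohammad-sahil513/demo-project | backend/modules/template/planner.py | _resolve_parent_section_id
-- ===== SOURCE A (Python) =====
-- def _resolve_parent_section_id(parent_stack: dict[int, str], level: int) -> str | None:
--     if level <= 1:
--         return None
--
--     for candidate_level in range(level - 1, 0, -1):
--         parent_id = parent_stack.get(candidate_level)
--         if parent_id:
--             return parent_id
--
--     return None
-- ===== SOURCE B (Python) =====
-- def _resolve_parent_section_id(parent_stack: dict[int, str], level: int) -> str | None:
--     candidates = [k for k, v in parent_stack.items() if 1 <= k < level and v]
--     return parent_stack[max(candidates)] if candidates else None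
-- ===== Notes on version B (the rewrite author's own statement) =====
-- stated objective: simpler
-- what changed: Replaced the descending range(level-1,0,-1) scan with early exit by a single filter over the dict's items (keys in [1,level) with truthy values) followed by max and one lookup.
import Mathlib
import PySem

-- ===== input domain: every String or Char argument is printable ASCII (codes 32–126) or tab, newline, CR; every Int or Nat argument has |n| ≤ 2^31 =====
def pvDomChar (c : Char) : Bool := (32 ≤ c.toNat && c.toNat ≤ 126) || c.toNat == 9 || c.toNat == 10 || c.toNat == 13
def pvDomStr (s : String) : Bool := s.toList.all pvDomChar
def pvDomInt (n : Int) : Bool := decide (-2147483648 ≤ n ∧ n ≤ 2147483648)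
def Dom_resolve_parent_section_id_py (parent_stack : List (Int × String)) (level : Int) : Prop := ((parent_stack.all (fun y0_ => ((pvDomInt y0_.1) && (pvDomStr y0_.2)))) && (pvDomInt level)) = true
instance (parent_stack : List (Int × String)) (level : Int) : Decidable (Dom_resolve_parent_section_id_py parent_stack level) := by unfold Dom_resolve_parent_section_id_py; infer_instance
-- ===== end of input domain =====

-- B replaces A's descending level scan with a filter of the dict's items plus max: simpler, one pass over the actual entries.

-- dict.get on the association list: first match (the type convention's dict lookup)
def pvDGet (parent_stack : List (Int × String)) (k : Int) : Option String :=
  (parent_stack.find? (fun kv => kv.1 == k)).map (·.2)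

-- ===== PORT A =====
-- the for-loop over range(level-1, 0, -1) with early return
def pvALoop (parent_stack : List (Int × String)) : List Int → Option String
  | [] => none
  | k :: rest =>
    match pvDGet parent_stack k with
    | some s => if s = "" then pvALoop parent_stack rest else some s
    | none => pvALoop parent_stack rest

def resolve_parent_section_id_py (parent_stack : List (Int × String)) (level : Int) : Option String :=
  if level ≤ 1 then none
  else pvALoop parent_stack (PySem.List.pyRange (level - 1) 0 (-1))

-- ===== PORT B =====
def resolve_parent_section_id_py_alt (parent_stack : List (Int × String)) (level : Int) : Option String :=
  let candidates := parent_stack.filterMap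
    (fun kv => if 1 ≤ kv.1 ∧ kv.1 < level ∧ kv.2 ≠ "" then some kv.1 else none)
  match PySem.List.max? candidates (fun x => x) with
  | some m => pvDGet parent_stack m   -- parent_stack[m]; m is a key, so the lookup is exact here
  | none => none

-- ===== PRECONDITION & SPEC =====
-- Pre_ excludes association lists with duplicate keys: those do not represent any Python dict
-- (both programs take a dict), and on them the two item traversals may pick different copies.
def Pre_resolve_parent_section_id_py (parent_stack : List (Int × String)) (level : Int) : Prop :=
  (parent_stack.map Prod.fst).Nodup
instance (parent_stack : List (Int × String)) (level : Int) : Decidable (Pre_resolve_parent_section_id_py parent_stack level) := by unfold Pre_resolve_parent_section_id_py; infer_instance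

def pvWitness_resolve_parent_section_id_py : (List (Int × String)) × Int := ([(1, "a"), (2, ""), (3, "c")], 3)

def Spec_resolve_parent_section_id_py (parent_stack : List (Int × String)) (level : Int) (out : Option String) : Prop := out = resolve_parent_section_id_py_alt parent_stack level
instance (parent_stack : List (Int × String)) (level : Int) (out : Option String) : Decidable (Spec_resolve_parent_section_id_py parent_stack level out) := by unfold Spec_resolve_parent_section_id_py; infer_instance

-- ===== CLAIM (what is proved, stated in full; the proofs are below) =====
def Claim_equal_resolve_parent_section_id_py : Prop := ∀ (parent_stack : List (Int × String)) (level : Int), Dom_resolve_parent_section_id_py parent_stack level → Pre_resolve_parent_section_id_py parent_stack level → Spec_resolve_parent_section_id_py parent_stack level (resolve_parent_section_id_py parent_stack level)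

-- ===== LEMMAS AND PROOFS =====

-- first-match lookup hits a present key's value when keys are distinct
lemma pvDGet_of_mem (ps : List (Int × String)) (k : Int) (v : String)
    (hnd : (ps.map Prod.fst).Nodup) (hm : (k, v) ∈ ps) : pvDGet ps k = some v := by
  induction ps with
  | nil => cases hm
  | cons hd tl ih =>
    simp only [List.map_cons, List.nodup_cons] at hnd
    rcases List.mem_cons.mp hm with h | h
    · subst h; simp [pvDGet]
    · have hk : hd.1 ≠ k := by
        intro he
        exact hnd.1 (he ▸ (List.mem_map).mpr ⟨(k, v), h, rfl⟩)
      simpa [pvDGet, hk] using ih hnd.2 h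

lemma pvDGet_mem (ps : List (Int × String)) (k : Int) (v : String)
    (h : pvDGet ps k = some v) : (k, v) ∈ ps := by
  induction ps with
  | nil => simp [pvDGet] at h
  | cons hd tl ih =>
    obtain ⟨a, b⟩ := hd
    by_cases hk : a = k
    · subst hk
      simp [pvDGet] at h
      exact h ▸ List.mem_cons_self
    · exact List.mem_cons_of_mem _ (ih (by simpa [pvDGet, List.find?_cons, hk] using h))

-- the scan returns none when no level in the list is populated
lemma pvALoop_none (ps : List (Int × String)) (l : List Int)
    (h : ∀ k ∈ l, ∀ v, pvDGet ps k = some v → v = "") : pvALoop ps l = none := by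
  induction l with
  | nil => rfl
  | cons a t ih =>
    have ht : ∀ k ∈ t, ∀ v, pvDGet ps k = some v → v = "" :=
      fun k hk => h k (List.mem_cons_of_mem _ hk)
    cases hg : pvDGet ps a with
    | none => simpa [pvALoop, hg] using ih ht
    | some s =>
      have : s = "" := h a (List.mem_cons_self) s hg
      subst this
      simpa [pvALoop, hg] using ih ht

-- the descending scan from a down to b+1 returns the value at m when every level strictly
-- between m and the top bound T is unpopulated
lemma pvALoop_range (ps : List (Int × String)) (b m T : Int) (v : String)
    (hv : pvDGet ps m = some v) (hne : v ≠ "")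
    (habove : ∀ k, m < k → k ≤ T → ∀ w, pvDGet ps k = some w → w = "") :
    ∀ a, m ≤ a → a ≤ T → b < m → pvALoop ps (PySem.List.pyRange a b (-1)) = some v := by
  intro a ha
  induction a, ha using Int.le_induction with
  | base =>
    intro _ hb
    rw [PySem.List.pyRange_neg_one_cons hb]
    simp [pvALoop, hv, hne]
  | succ a ha ih =>
    intro hT hb
    rw [PySem.List.pyRange_neg_one_cons (by omega)]
    cases hg : pvDGet ps (a + 1) with
    | none => simpa [pvALoop, hg] using ih (by omega) hb
    | some w =>
      have hw : w = "" := habove (a + 1) (by omega) hT w hg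
      subst hw
      simpa [pvALoop, hg] using ih (by omega) hb

-- membership in B's candidate list
lemma pv_mem_cand (ps : List (Int × String)) (level k : Int) :
    k ∈ ps.filterMap (fun kv => if 1 ≤ kv.1 ∧ kv.1 < level ∧ kv.2 ≠ "" then some kv.1 else none)
    ↔ ∃ v, (k, v) ∈ ps ∧ 1 ≤ k ∧ k < level ∧ v ≠ "" := by
  simp only [List.mem_filterMap]
  constructor
  · rintro ⟨⟨k', v⟩, hm, hif⟩
    by_cases h : 1 ≤ k' ∧ k' < level ∧ v ≠ ""
    · simp only [if_pos h, Option.some.injEq] at hif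
      exact ⟨v, hif ▸ hm, hif ▸ h⟩
    · simp [if_neg h] at hif
  · rintro ⟨v, hm, h⟩
    exact ⟨(k, v), hm, by simp [if_pos h]⟩

-- ===== VERDICT (by name: the statement is the Claim_ definition above) =====
theorem resolve_parent_section_id_py_spec : Claim_equal_resolve_parent_section_id_py := by
  intro ps level _ hnd
  unfold Spec_resolve_parent_section_id_py resolve_parent_section_id_py resolve_parent_section_id_py_alt
  cases hmax : PySem.List.max?
      (ps.filterMap (fun kv => if 1 ≤ kv.1 ∧ kv.1 < level ∧ kv.2 ≠ "" then some kv.1 else none))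
      (fun x => x) with
  | none =>
    have hnil := (PySem.List.max?_eq_none_iff _ _).mp hmax
    simp only [hmax]
    split_ifs with hlev
    · rfl
    · apply pvALoop_none
      intro k hk v hg
      by_contra hne
      have hkr := (PySem.List.mem_pyRange_neg_one).mp hk
      have : k ∈ ps.filterMap (fun kv => if 1 ≤ kv.1 ∧ kv.1 < level ∧ kv.2 ≠ "" then some kv.1 else none) :=
        (pv_mem_cand ps level k).mpr ⟨v, pvDGet_mem ps k v hg, by omega, by omega, hne⟩
      simp [hnil] at this
  | some m =>
    obtain ⟨v, hmem, h1, h2, hvne⟩ := (pv_mem_cand ps level m).mp (PySem.List.max?_mem hmax)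
    have hmax' := PySem.List.max?_isMax hmax
    have hget : pvDGet ps m = some v := pvDGet_of_mem ps m v hnd hmem
    simp only [hmax]
    have hlev : ¬ level ≤ 1 := by omega
    rw [if_neg hlev]
    rw [pvALoop_range ps 0 m (level - 1) v hget hvne ?_ (level - 1) (by omega) le_rfl (by omega), hget]
    intro k hk hkT w hw
    by_contra hwne
    have : k ∈ ps.filterMap (fun kv => if 1 ≤ kv.1 ∧ kv.1 < level ∧ kv.2 ≠ "" then some kv.1 else none) :=
      (pv_mem_cand ps level k).mpr ⟨w, pvDGet_mem ps k w hw, by omega, by omega, hwne⟩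
    exact absurd (hmax' k this) (by omega)
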